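-- pv_equiv track=rewrite | github.com/Shyam-AI-Engineer/Smart-Medi-Assistant-System---Multi-Agents-Rule-Based-Coding | backend/app/agents/medication_agent.py | _determine_overall_risk
-- ===== SOURCE A (Python) =====
-- from typing import Optional, Dict, Any, List
--
-- def _determine_overall_risk(
--
--     interactions: List[Dict],
--     contraindications: List[Dict]
-- ) -> str:
--     """Determine overall medication risk level."""
--     # HIGH if any contraindications
--     if contraindications:
--         for contra in contraindications:
--             if contra.get("risk_level") == "HIGH":
--                 return "HIGH"
--
--     # HIGH if any HIGH-risk interactions
--     for interaction in interactions:
--         if interaction.get("risk") == "HIGH":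
--             return "HIGH"
--
--     # MODERATE if any MODERATE interactions
--     for interaction in interactions:
--         if interaction.get("risk") == "MODERATE":
--             return "MODERATE"
--
--     # LOW if any LOW interactions
--     for interaction in interactions:
--         if interaction.get("risk") == "LOW":
--             return "LOW"
--
--     return "NONE"
-- ===== SOURCE B (Python) =====
-- def _determine_overall_risk(interactions, contraindications):
--     """Determine overall medication risk level (single max-accumulating pass)."""
--     best = 0
--     for it in interactions:
--         r = it.get("risk")
--         best = max(best, 3 if r == "HIGH" else 2 if r == "MODERATE" else 1 if r == "LOW" else 0)
--     if any(c.get("risk_level") == "HIGH" for c in contraindications):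
--         best = 3
--     return ("NONE", "LOW", "MODERATE", "HIGH")[best]
-- ===== Notes on version B (the rewrite author's own statement) =====
-- stated objective: simpler
-- what changed: Replaces A's three short-circuiting scans over interactions (plus a contraindication scan) with one max-accumulating pass using a numeric priority, then maps the maximum back to a label.
import Mathlib
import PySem

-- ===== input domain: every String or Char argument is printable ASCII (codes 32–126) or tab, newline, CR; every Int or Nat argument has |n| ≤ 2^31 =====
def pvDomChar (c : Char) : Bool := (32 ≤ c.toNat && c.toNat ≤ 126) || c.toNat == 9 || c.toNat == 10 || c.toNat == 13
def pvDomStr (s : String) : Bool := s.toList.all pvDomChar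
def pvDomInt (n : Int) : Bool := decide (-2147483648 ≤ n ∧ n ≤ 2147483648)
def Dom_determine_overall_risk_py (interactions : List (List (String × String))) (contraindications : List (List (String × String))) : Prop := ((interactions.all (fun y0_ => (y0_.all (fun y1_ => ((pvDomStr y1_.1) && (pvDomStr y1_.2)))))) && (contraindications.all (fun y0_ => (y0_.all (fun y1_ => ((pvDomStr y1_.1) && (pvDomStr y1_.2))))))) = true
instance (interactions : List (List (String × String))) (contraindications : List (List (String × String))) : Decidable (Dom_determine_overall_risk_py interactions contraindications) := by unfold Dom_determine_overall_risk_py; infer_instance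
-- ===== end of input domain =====

-- B replaces A's three short-circuiting scans with one max-accumulating pass over a
-- numeric priority, mapped back to a label at the end (objective: simpler).

-- ===== PORT A =====
-- dict.get(k): first match in the association list, none if absent (Python returns None)
def pvGet (d : List (String × String)) (k : String) : Option String :=
  (d.find? (fun p => p.1 == k)).map (·.2)

-- 'for contra in contraindications: if contra.get("risk_level") == "HIGH": return "HIGH"'
def pvContraScan : List (List (String × String)) → Bool
  | [] => false
  | c :: rest => if pvGet c "risk_level" == some "HIGH" then true else pvContraScan rest

-- 'for interaction in interactions: if interaction.get("risk") == lvl: return lvl'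
def pvRiskScan (lvl : String) : List (List (String × String)) → Bool
  | [] => false
  | d :: rest => if pvGet d "risk" == some lvl then true else pvRiskScan lvl rest

def determine_overall_risk_py (interactions : List (List (String × String))) (contraindications : List (List (String × String))) : String :=
  if (if contraindications.isEmpty then false else pvContraScan contraindications) then "HIGH"
  else if pvRiskScan "HIGH" interactions then "HIGH"
  else if pvRiskScan "MODERATE" interactions then "MODERATE"
  else if pvRiskScan "LOW" interactions then "LOW"
  else "NONE"

-- ===== PORT B =====
-- '3 if r == "HIGH" else 2 if r == "MODERATE" else 1 if r == "LOW" else 0'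
def pvPrio (d : List (String × String)) : Nat :=
  let r := pvGet d "risk"
  if r == some "HIGH" then 3 else if r == some "MODERATE" then 2
  else if r == some "LOW" then 1 else 0

def determine_overall_risk_py_alt (interactions : List (List (String × String))) (contraindications : List (List (String × String))) : String :=
  let best := interactions.foldl (fun b d => max b (pvPrio d)) 0
  let best := if contraindications.any (fun c => pvGet c "risk_level" == some "HIGH") then 3 else best
  -- '("NONE", "LOW", "MODERATE", "HIGH")[best]'; best is always ≤ 3, so the tuple index is this match
  match best with
  | 0 => "NONE" | 1 => "LOW" | 2 => "MODERATE" | _ => "HIGH"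

-- ===== PRECONDITION & SPEC =====
def Spec_determine_overall_risk_py (interactions : List (List (String × String))) (contraindications : List (List (String × String))) (out : String) : Prop := out = determine_overall_risk_py_alt interactions contraindications
instance (interactions : List (List (String × String))) (contraindications : List (List (String × String))) (out : String) : Decidable (Spec_determine_overall_risk_py interactions contraindications out) := by unfold Spec_determine_overall_risk_py; infer_instance

-- ===== CLAIM (what is proved, stated in full; the proofs are below) =====
def Claim_equal_determine_overall_risk_py : Prop := ∀ (interactions : List (List (String × String))) (contraindications : List (List (String × String))), Dom_determine_overall_risk_py interactions contraindications → Spec_determine_overall_risk_py interactions contraindications (determine_overall_risk_py interactions contraindications)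

-- ===== LEMMAS AND PROOFS =====

-- ===== VERDICT (by name: the statement is the Claim_ definition above) =====
lemma contraScan_eq_any (cs : List (List (String × String))) :
    pvContraScan cs = cs.any (fun c => pvGet c "risk_level" == some "HIGH") := by
  induction cs with
  | nil => rfl
  | cons c cs ih =>
    simp only [pvContraScan, ih, List.any_cons]
    split_ifs with h <;> simp_all

lemma riskScan_eq_any (lvl : String) (xs : List (List (String × String))) :
    pvRiskScan lvl xs = xs.any (fun d => pvGet d "risk" == some lvl) := by
  induction xs with
  | nil => rfl
  | cons d xs ih =>
    simp only [pvRiskScan, ih, List.any_cons]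
    split_ifs with h <;> simp_all

-- the maximum priority occurring in xs, as the label-chain A scans for
def pvChain (xs : List (List (String × String))) : Nat :=
  if xs.any (fun d => pvGet d "risk" == some "HIGH") then 3
  else if xs.any (fun d => pvGet d "risk" == some "MODERATE") then 2
  else if xs.any (fun d => pvGet d "risk" == some "LOW") then 1 else 0

lemma pvChain_cons (x : List (String × String)) (xs : List (List (String × String))) :
    pvChain (x :: xs) = max (pvPrio x) (pvChain xs) := by
  unfold pvChain pvPrio
  simp only [List.any_cons, Bool.or_eq_true, beq_iff_eq]
  by_cases h1 : pvGet x "risk" = some "HIGH" <;>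
    by_cases h2 : pvGet x "risk" = some "MODERATE" <;>
    by_cases h3 : pvGet x "risk" = some "LOW" <;>
    simp_all <;> split_ifs <;> omega

lemma foldl_max_prio (xs : List (List (String × String))) (acc : Nat) :
    xs.foldl (fun b d => max b (pvPrio d)) acc = max acc (pvChain xs) := by
  induction xs generalizing acc with
  | nil => simp [pvChain]
  | cons x xs ih =>
    simp only [List.foldl_cons, ih, pvChain_cons]
    omega

theorem determine_overall_risk_py_spec : Claim_equal_determine_overall_risk_py := by
  intro ints cons _
  unfold Spec_determine_overall_risk_py determine_overall_risk_py determine_overall_risk_py_alt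
  rw [foldl_max_prio, contraScan_eq_any, riskScan_eq_any, riskScan_eq_any, riskScan_eq_any]
  unfold pvChain
  have hguard : (if cons.isEmpty then false
      else cons.any (fun c => pvGet c "risk_level" == some "HIGH")) =
      cons.any (fun c => pvGet c "risk_level" == some "HIGH") := by
    cases cons <;> simp
  rw [hguard]
  split_ifs <;> simp
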